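-- pv_equiv track=rewrite | github.com/plammfish/HackBulgaria-Programming101 | week0/sum_of_min_and_max/solution.py | sum_of_min_and_max
-- ===== SOURCE A (Python) =====
-- def sum_of_min_and_max(arr):
-- 	min = arr[0]
-- 	max = arr[0]
--
-- 	for item in arr:
-- 		if item > max:
-- 			max = item
-- 		if item < min:
-- 			min = item
--
-- 	return min + max
-- ===== SOURCE B (Python) =====
-- def sum_of_min_and_max(arr):
--     s = sorted(arr)
--     return s[0] + s[-1]
-- ===== Notes on version B (the rewrite author's own statement) =====
-- stated objective: simpler
-- what changed: Replaces the single-pass loop tracking running min and max with sorting a copy of the array and adding its first and last elements.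
import Mathlib
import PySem

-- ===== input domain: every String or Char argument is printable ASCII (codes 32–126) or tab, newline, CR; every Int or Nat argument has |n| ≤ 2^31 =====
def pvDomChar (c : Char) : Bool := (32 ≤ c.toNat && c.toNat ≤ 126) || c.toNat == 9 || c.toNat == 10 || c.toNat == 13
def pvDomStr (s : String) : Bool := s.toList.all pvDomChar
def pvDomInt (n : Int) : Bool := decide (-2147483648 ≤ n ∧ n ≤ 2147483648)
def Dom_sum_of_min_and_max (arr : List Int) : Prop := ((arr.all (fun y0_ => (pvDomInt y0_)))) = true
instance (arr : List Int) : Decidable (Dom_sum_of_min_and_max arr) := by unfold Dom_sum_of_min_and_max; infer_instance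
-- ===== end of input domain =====

-- B sorts a copy of the array and adds its first and last elements instead of one pass tracking running min and max.

-- ===== PORT A =====
def sum_of_min_and_max (arr : List Int) : Int :=
  match PySem.List.pyGet? arr 0 with
  | none => 0   -- arr[0] raises IndexError on []; excluded by Pre_
  | some h =>
    let p := arr.foldl (fun (p : Int × Int) item =>
      let mx := if item > p.2 then item else p.2
      let mn := if item < p.1 then item else p.1
      (mn, mx)) (h, h)
    p.1 + p.2

-- ===== PORT B =====
def sum_of_min_and_max_alt (arr : List Int) : Int :=
  let s := PySem.List.sorted arr (fun x => x) false
  match PySem.List.pyGet? s 0, PySem.List.pyGet? s (-1) with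
  | some a, some b => a + b
  | _, _ => 0   -- s[0] raises IndexError on []; excluded by Pre_

-- ===== PRECONDITION & SPEC =====
-- Pre_ excludes the empty list, on which both programs raise IndexError.
def Pre_sum_of_min_and_max (arr : List Int) : Prop := arr ≠ []
instance (arr : List Int) : Decidable (Pre_sum_of_min_and_max arr) := by unfold Pre_sum_of_min_and_max; infer_instance
def pvWitness_sum_of_min_and_max : List Int := [3, -1, 7, 7, 2]

def Spec_sum_of_min_and_max (arr : List Int) (out : Int) : Prop := out = sum_of_min_and_max_alt arr
instance (arr : List Int) (out : Int) : Decidable (Spec_sum_of_min_and_max arr out) := by unfold Spec_sum_of_min_and_max; infer_instance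

-- ===== CLAIM (what is proved, stated in full; the proofs are below) =====
def Claim_equal_sum_of_min_and_max : Prop := ∀ (arr : List Int), Dom_sum_of_min_and_max arr → Pre_sum_of_min_and_max arr → Spec_sum_of_min_and_max arr (sum_of_min_and_max arr)

-- ===== LEMMAS AND PROOFS =====

-- A's paired fold splits into a min-fold and a max-fold.
theorem pv_fold_split (l : List Int) (x y : Int) :
    l.foldl (fun (p : Int × Int) item =>
      let mx := if item > p.2 then item else p.2
      let mn := if item < p.1 then item else p.1
      (mn, mx)) (x, y)
    = (l.foldl min x, l.foldl max y) := by
  induction l generalizing x y with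
  | nil => rfl
  | cons a t ih =>
      have h1 : (if a < x then a else x) = min x a := by
        simp only [min_def]; split_ifs <;> omega
      have h2 : (if a > y then a else y) = max y a := by
        simp only [gt_iff_lt, max_def]; split_ifs <;> omega
      simp only [List.foldl_cons, h1, h2, ih]

theorem pv_foldl_min_mem (l : List Int) (x : Int) : l.foldl min x ∈ x :: l := by
  induction l generalizing x with
  | nil => simp
  | cons a t ih =>
      have hm := ih (min x a)
      simp only [List.foldl_cons]
      simp only [List.mem_cons] at hm ⊢
      rcases hm with h | h
      · rcases min_choice x a with h' | h' <;> rw [h, h'] <;> simp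
      · simp [h]

theorem pv_foldl_min_init (l : List Int) (x : Int) : l.foldl min x ≤ x := by
  induction l generalizing x with
  | nil => simp
  | cons a t ih => exact le_trans (ih (min x a)) (min_le_left x a)

theorem pv_foldl_max_init (l : List Int) (x : Int) : x ≤ l.foldl max x := by
  induction l generalizing x with
  | nil => simp
  | cons a t ih => exact le_trans (le_max_left x a) (ih (max x a))

theorem pv_foldl_min_le (l : List Int) (x y : Int) (hy : y ∈ x :: l) : l.foldl min x ≤ y := by
  induction l generalizing x with
  | nil => simp only [List.mem_cons, List.not_mem_nil, or_false] at hy; simp [hy]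
  | cons a t ih =>
      simp only [List.foldl_cons]
      simp only [List.mem_cons] at hy
      rcases hy with h | h | h
      · exact le_trans (pv_foldl_min_init t (min x a)) (h ▸ min_le_left x a)
      · exact le_trans (pv_foldl_min_init t (min x a)) (h ▸ min_le_right x a)
      · exact ih (min x a) (by simp [h])

theorem pv_foldl_max_mem (l : List Int) (x : Int) : l.foldl max x ∈ x :: l := by
  induction l generalizing x with
  | nil => simp
  | cons a t ih =>
      have hm := ih (max x a)
      simp only [List.foldl_cons]
      simp only [List.mem_cons] at hm ⊢
      rcases hm with h | h
      · rcases max_choice x a with h' | h' <;> rw [h, h'] <;> simp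
      · simp [h]

theorem pv_foldl_max_ge (l : List Int) (x y : Int) (hy : y ∈ x :: l) : y ≤ l.foldl max x := by
  induction l generalizing x with
  | nil => simp only [List.mem_cons, List.not_mem_nil, or_false] at hy; simp [hy]
  | cons a t ih =>
      simp only [List.foldl_cons]
      simp only [List.mem_cons] at hy
      rcases hy with h | h | h
      · exact le_trans (h ▸ le_max_left x a) (pv_foldl_max_init t (max x a))
      · exact le_trans (h ▸ le_max_right x a) (pv_foldl_max_init t (max x a))
      · exact ih (max x a) (by simp [h])

-- last element of a ≤-pairwise list is an upper bound
theorem pv_le_getLast : ∀ (s : List Int), s.Pairwise (· ≤ ·) → ∀ (hne : s ≠ []),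
    ∀ y ∈ s, y ≤ s.getLast hne := by
  intro s
  induction s with
  | nil => intro _ hne; exact absurd rfl hne
  | cons a t ih =>
      intro hp hne y hy
      rcases List.pairwise_cons.mp hp with ⟨ha, hpt⟩
      cases t with
      | nil =>
          simp only [List.mem_cons, List.not_mem_nil, or_false] at hy
          simp [hy]
      | cons b u =>
          rw [List.getLast_cons (by simp)]
          simp only [List.mem_cons] at hy
          rcases hy with h | hy'
          · subst h
            exact le_trans (ha b (by simp)) (ih hpt (by simp) b (by simp))
          · exact ih hpt (by simp) y (by simp [hy'])

theorem sum_of_min_and_max_spec : Claim_equal_sum_of_min_and_max := by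
  intro arr _ hpre
  unfold Spec_sum_of_min_and_max
  obtain ⟨h, t, rfl⟩ : ∃ h t, arr = h :: t := by
    cases arr with
    | nil => exact absurd rfl hpre
    | cons h t => exact ⟨h, t, rfl⟩
  -- evaluate A
  have hA : sum_of_min_and_max (h :: t) = (h :: t).foldl min h + (h :: t).foldl max h := by
    unfold sum_of_min_and_max
    rw [PySem.List.pyGet?_zero_cons]
    simp only [pv_fold_split]
  obtain ⟨m, s', hs⟩ : ∃ m s', PySem.List.sorted (h :: t) (fun x => x) false = m :: s' := by
    cases hse : PySem.List.sorted (h :: t) (fun x => x) false with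
    | nil => exact absurd ((PySem.List.sorted_eq_nil_iff _ _ _).mp hse) (by simp)
    | cons m s' => exact ⟨m, s', rfl⟩
  -- evaluate B
  have hB : sum_of_min_and_max_alt (h :: t) = m + (m :: s').getLast (by simp) := by
    simp only [sum_of_min_and_max_alt, hs, PySem.List.pyGet?_zero_cons,
      PySem.List.pyGet?_neg_one]
    rw [List.getLast?_eq_some_getLast (by simp)]
  rw [hA, hB]
  have hmem_s : ∀ y : Int, y ∈ m :: s' ↔ y ∈ h :: t := by
    intro y; rw [← hs]; exact PySem.List.mem_sorted _ _ _ _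
  -- min part
  have hmin1 : (h :: t).foldl min h ≤ m := by
    refine pv_foldl_min_le _ _ _ ?_
    exact List.mem_cons_of_mem h ((hmem_s m).mp (by simp))
  have hmin2 : m ≤ (h :: t).foldl min h := by
    have hmm : (h :: t).foldl min h ∈ h :: t := by
      rcases List.mem_cons.mp (pv_foldl_min_mem (h :: t) h) with hc | hc
      · rw [hc]; exact List.mem_cons_self
      · exact hc
    exact PySem.List.key_head_sorted_le _ _ hs _ hmm
  -- max part
  have hpw : (m :: s').Pairwise (· ≤ ·) := by
    rw [← hs]
    exact PySem.List.sorted_pairwise _ _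
  have hmax1 : (h :: t).foldl max h ≤ (m :: s').getLast (by simp) := by
    refine pv_le_getLast _ hpw _ _ ?_
    refine (hmem_s _).mpr ?_
    rcases List.mem_cons.mp (pv_foldl_max_mem (h :: t) h) with hc | hc
    · rw [hc]; exact List.mem_cons_self
    · exact hc
  have hmax2 : (m :: s').getLast (by simp) ≤ (h :: t).foldl max h := by
    refine pv_foldl_max_ge _ _ _ ?_
    exact List.mem_cons_of_mem h ((hmem_s _).mp (List.getLast_mem _))
  omega
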